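-- pv_equiv track=rewrite | github.com/loloj-0/changescout | src/changescout/geoadmin.py | infer_canton_from_source_id
-- ===== SOURCE A (Python) =====
-- from typing import Any, Dict, List
--
-- def infer_canton_from_source_id(source_id: Any) -> str:
--     text = str(source_id or "").casefold()
--
--     canton_prefixes = {
--         "ag_": "AG",
--         "be_": "BE",
--         "sg_": "SG",
--         "zh_": "ZH",
--     }
--
--     for prefix, canton in canton_prefixes.items():
--         if text.startswith(prefix):
--             return canton
--
--     return ""
-- ===== SOURCE B (Python) =====
-- def infer_canton_from_source_id(source_id):
--     text = str(source_id or "").casefold()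
--     head, sep, _tail = text.partition("_")
--     if not sep:
--         return ""
--     return {"ag": "AG", "be": "BE", "sg": "SG", "zh": "ZH"}.get(head, "")
-- ===== Notes on version B (the rewrite author's own statement) =====
-- stated objective: alternative
-- what changed: Replaces the four-iteration prefix scan with a single partition at the first underscore followed by one lookup of the extracted head in a sep-less key map.
import Mathlib
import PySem

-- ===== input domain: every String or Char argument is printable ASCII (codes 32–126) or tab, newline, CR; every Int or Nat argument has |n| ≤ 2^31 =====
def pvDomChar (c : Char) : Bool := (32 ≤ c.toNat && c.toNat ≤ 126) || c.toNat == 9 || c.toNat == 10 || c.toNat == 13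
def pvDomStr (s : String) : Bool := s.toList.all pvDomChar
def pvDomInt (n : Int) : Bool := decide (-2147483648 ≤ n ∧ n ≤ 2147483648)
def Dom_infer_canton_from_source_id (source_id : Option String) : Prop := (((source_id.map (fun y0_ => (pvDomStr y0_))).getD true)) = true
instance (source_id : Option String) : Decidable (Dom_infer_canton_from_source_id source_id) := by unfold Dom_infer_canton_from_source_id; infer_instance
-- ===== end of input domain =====

-- B replaces A's scan over four "xx_" prefixes by one partition at the first underscore plus a single dict lookup of the head (alternative decomposition, same cost).

-- ===== PORT A =====
-- the literal canton_prefixes dict, iterated in insertion order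
def pvCantonPrefixes : List (String × String) :=
  [("ag_", "AG"), ("be_", "BE"), ("sg_", "SG"), ("zh_", "ZH")]

-- the for-loop with early return over the dict items
def pvLoopA (text : String) : List (String × String) → String
  | [] => ""
  | (prefix_, canton) :: rest =>
    if PySem.Str.startswith text prefix_ then canton else pvLoopA text rest

def infer_canton_from_source_id (source_id : Option String) : String :=
  let text := PySem.Str.lower (source_id.getD "")
  pvLoopA text pvCantonPrefixes

-- ===== PORT B =====
-- hand port of text.partition("_") for the 1-char separator: returns the head iff "_" occurs (exact there)
def pvPartHead : List Char → Option (List Char)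
  | [] => none
  | c :: rest => if c = '_' then some [] else (pvPartHead rest).map (c :: ·)

def infer_canton_from_source_id_alt (source_id : Option String) : String :=
  let text := PySem.Str.lower (source_id.getD "")
  match pvPartHead text.toList with
  | none => ""
  | some head =>
      (PySem.Dict.ofList [("ag", "AG"), ("be", "BE"), ("sg", "SG"), ("zh", "ZH")]).getD
        (String.ofList head) ""

-- ===== PRECONDITION & SPEC =====
def Spec_infer_canton_from_source_id (source_id : Option String) (out : String) : Prop := out = infer_canton_from_source_id_alt source_id
instance (source_id : Option String) (out : String) : Decidable (Spec_infer_canton_from_source_id source_id out) := by unfold Spec_infer_canton_from_source_id; infer_instance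

-- ===== CLAIM (what is proved, stated in full; the proofs are below) =====
def Claim_equal_infer_canton_from_source_id : Prop := ∀ (source_id : Option String), Dom_infer_canton_from_source_id source_id → Spec_infer_canton_from_source_id source_id (infer_canton_from_source_id source_id)

-- ===== LEMMAS AND PROOFS =====

lemma eq_ofList_iff (s : String) (h : List Char) : (s = String.ofList h) ↔ h = s.toList := by
  constructor
  · intro e; have := congrArg String.toList e; simpa [eq_comm] using this
  · intro e; subst e; simp

-- the B-side lookup, characterised as an if-chain on the head
lemma getD_table (h : List Char) :
    (PySem.Dict.ofList [("ag", "AG"), ("be", "BE"), ("sg", "SG"), ("zh", "ZH")]).getD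
        (String.ofList h) "" =
      if h = ['a', 'g'] then "AG"
      else if h = ['b', 'e'] then "BE"
      else if h = ['s', 'g'] then "SG"
      else if h = ['z', 'h'] then "ZH"
      else "" := by
  rw [show (PySem.Dict.ofList [("ag", "AG"), ("be", "BE"), ("sg", "SG"), ("zh", "ZH")] : PySem.Dict String String) = PySem.Dict.mk [("ag", "AG"), ("be", "BE"), ("sg", "SG"), ("zh", "ZH")] from by decide]
  simp only [PySem.Dict.getD_eq_get?_getD, PySem.Dict.get?_mk_cons, beq_iff_eq, eq_ofList_iff,
    show ("ag".toList) = ['a','g'] from rfl, show ("be".toList) = ['b','e'] from rfl,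
    show ("sg".toList) = ['s','g'] from rfl, show ("zh".toList) = ['z','h'] from rfl]
  split_ifs <;> rfl

-- list-level core equivalence between A's prefix chain and B's partition+lookup
lemma core (l : List Char) :
    pvLoopA (String.ofList l) pvCantonPrefixes =
      (match pvPartHead l with
       | none => ""
       | some head =>
           (PySem.Dict.ofList [("ag", "AG"), ("be", "BE"), ("sg", "SG"), ("zh", "ZH")]).getD
             (String.ofList head) "") := by
  have e0 : (PySem.Dict.ofList [("ag", "AG"), ("be", "BE"), ("sg", "SG"), ("zh", "ZH")]).getD "" "" = "" := by decide
  match l with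
  | [] => simp [pvLoopA, pvCantonPrefixes, pvPartHead, PySem.Chars.startswith_iff]
  | [a] =>
      by_cases ha : a = '_' <;>
        simp [pvLoopA, pvCantonPrefixes, pvPartHead, PySem.Chars.startswith_iff,
          List.cons_prefix_cons, ha, e0]
  | [a, b] =>
      by_cases ha : a = '_' <;> by_cases hb : b = '_' <;>
        simp [pvLoopA, pvCantonPrefixes, pvPartHead, PySem.Chars.startswith_iff,
          List.cons_prefix_cons, ha, hb, e0, getD_table]
  | a :: b :: c :: rest =>
      by_cases ha : a = '_'
      · simp [pvLoopA, pvCantonPrefixes, pvPartHead, PySem.Chars.startswith_iff,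
          List.cons_prefix_cons, ha, e0]
      · by_cases hb : b = '_'
        · simp [pvLoopA, pvCantonPrefixes, pvPartHead, PySem.Chars.startswith_iff,
            List.cons_prefix_cons, ha, hb, getD_table]
        · by_cases hc : c = '_'
          · subst hc
            simp [pvLoopA, pvCantonPrefixes, pvPartHead, PySem.Chars.startswith_iff,
              List.cons_prefix_cons, ha, hb, getD_table]
            simp only [eq_comm]
          · have hc' : ¬ ('_' = c) := fun e => hc e.symm
            cases e : pvPartHead rest with
            | none =>
                simp [pvLoopA, pvCantonPrefixes, pvPartHead, PySem.Chars.startswith_iff,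
                  List.cons_prefix_cons, ha, hb, hc, hc', e]
            | some t =>
                simp [pvLoopA, pvCantonPrefixes, pvPartHead, PySem.Chars.startswith_iff,
                  List.cons_prefix_cons, ha, hb, hc, hc', e, getD_table]

-- ===== VERDICT (by name: the statement is the Claim_ definition above) =====
theorem infer_canton_from_source_id_spec : Claim_equal_infer_canton_from_source_id := by
  intro source_id _
  unfold Spec_infer_canton_from_source_id infer_canton_from_source_id infer_canton_from_source_id_alt
  have := core (PySem.Str.lower (source_id.getD "")).toList
  simpa using this
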